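-- pv_equiv track=rewrite | github.com/HACKMANV8/2-States | pr_testing/codebase_analyzer.py | get_test_focus_areas
-- ===== SOURCE A (Python) =====
-- from typing import Dict, Any, List, Optional
--
-- def get_test_focus_areas(pr_files: List[Dict[str, Any]], codebase_analysis: Dict[str, Any]) -> List[str]:
--     """
--     Determine what areas to focus on for testing based on changed files.
--
--     Args:
--         pr_files: List of files changed in PR
--         codebase_analysis: Codebase analysis result
--
--     Returns:
--         List of focus areas for testing
--     """
--     focus_areas = []
--
--     # Categorize changed files
--     ui_files = []
--     api_files = []
--     db_files = []
--     config_files = []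
--     test_files = []
--
--     for file_info in pr_files:
--         filename = file_info["filename"]
--
--         # UI components
--         if any(ext in filename for ext in [".tsx", ".jsx", ".vue", ".svelte", "components/"]):
--             ui_files.append(filename)
--
--         # API/Backend
--         if any(pattern in filename for pattern in ["api/", "routes/", "endpoints/", "views.py", "controllers/"]):
--             api_files.append(filename)
--
--         # Database
--         if any(pattern in filename for pattern in ["models/", "schema", "migrations/", "db/"]):
--             db_files.append(filename)
--
--         # Config
--         if any(ext in filename for ext in [".config", ".json", ".yml", ".yaml", ".env"]):
--             config_files.append(filename)
--
--         # Tests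
--         if any(pattern in filename for pattern in ["test", "spec", "__tests__"]):
--             test_files.append(filename)
--
--     # Build focus areas
--     if ui_files:
--         focus_areas.append(f"UI Components ({len(ui_files)} files changed)")
--
--     if api_files:
--         focus_areas.append(f"API Endpoints ({len(api_files)} files changed)")
--
--     if db_files:
--         focus_areas.append(f"Database Schema ({len(db_files)} files changed)")
--
--     if config_files:
--         focus_areas.append(f"Configuration ({len(config_files)} files changed)")
--
--     return focus_areas if focus_areas else ["General functionality"]
-- ===== SOURCE B (Python) =====
-- def get_test_focus_areas(pr_files, codebase_analysis):
--     RULES = [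
--         ("UI Components", [".tsx", ".jsx", ".vue", ".svelte", "components/"]),
--         ("API Endpoints", ["api/", "routes/", "endpoints/", "views.py", "controllers/"]),
--         ("Database Schema", ["models/", "schema", "migrations/", "db/"]),
--         ("Configuration", [".config", ".json", ".yml", ".yaml", ".env"]),
--     ]
--     focus_areas = []
--     for label, patterns in RULES:
--         count = sum(1 for f in pr_files if any(p in f["filename"] for p in patterns))
--         if count:
--             focus_areas.append(f"{label} ({count} files changed)")
--     return focus_areas if focus_areas else ["General functionality"]
-- ===== Notes on version B (the rewrite author's own statement) =====
-- stated objective: simpler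
-- what changed: Replaces the file-outer loop that accumulates five per-category filename lists with a data-driven category-outer pass over an ordered rule table that only counts matching files, dropping the unused test-file branch.
import Mathlib
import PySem

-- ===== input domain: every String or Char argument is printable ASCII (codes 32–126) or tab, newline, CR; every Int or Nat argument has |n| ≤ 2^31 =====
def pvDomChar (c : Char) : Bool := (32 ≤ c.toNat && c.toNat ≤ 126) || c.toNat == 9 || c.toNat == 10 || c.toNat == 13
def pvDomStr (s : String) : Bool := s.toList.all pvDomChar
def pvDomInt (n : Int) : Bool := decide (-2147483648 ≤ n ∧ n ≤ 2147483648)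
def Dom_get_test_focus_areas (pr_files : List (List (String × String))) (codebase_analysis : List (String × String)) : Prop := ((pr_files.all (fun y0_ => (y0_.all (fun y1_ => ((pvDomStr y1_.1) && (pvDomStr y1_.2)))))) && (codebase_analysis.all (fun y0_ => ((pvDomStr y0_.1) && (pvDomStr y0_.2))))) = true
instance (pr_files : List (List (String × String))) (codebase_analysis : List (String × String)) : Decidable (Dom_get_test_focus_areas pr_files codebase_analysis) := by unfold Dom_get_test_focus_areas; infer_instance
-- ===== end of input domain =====

-- B replaces A's file-outer loop that builds five per-category filename lists with a
-- category-outer pass over an ordered rule table that only counts matches (objective: simpler).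

-- shared helper: file_info["filename"] (first-match assoc lookup; total form under Pre_)
def pvFname (fi : List (String × String)) : String :=
  ((fi.find? (fun kv => kv.1 == "filename")).map (·.2)).getD ""

-- ===== PORT A =====
def get_test_focus_areas (pr_files : List (List (String × String))) (codebase_analysis : List (String × String)) : List String :=
  -- categorize changed files: one pass, five accumulated lists (ui, api, db, config, test)
  let r := pr_files.foldl
    (fun (st : List String × List String × List String × List String × List String) fi =>
      let filename := pvFname fi
      let ui := if [".tsx", ".jsx", ".vue", ".svelte", "components/"].any (fun ext => PySem.Str.isIn ext filename) then st.1 ++ [filename] else st.1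
      let api := if ["api/", "routes/", "endpoints/", "views.py", "controllers/"].any (fun p => PySem.Str.isIn p filename) then st.2.1 ++ [filename] else st.2.1
      let db := if ["models/", "schema", "migrations/", "db/"].any (fun p => PySem.Str.isIn p filename) then st.2.2.1 ++ [filename] else st.2.2.1
      let cfg := if [".config", ".json", ".yml", ".yaml", ".env"].any (fun ext => PySem.Str.isIn ext filename) then st.2.2.2.1 ++ [filename] else st.2.2.2.1
      let ts := if ["test", "spec", "__tests__"].any (fun p => PySem.Str.isIn p filename) then st.2.2.2.2 ++ [filename] else st.2.2.2.2
      (ui, api, db, cfg, ts))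
    ([], [], [], [], [])
  -- build focus areas
  let fa0 : List String := []
  let fa1 := if r.1 ≠ [] then fa0 ++ ["UI Components (" ++ PySem.Int.toStr (r.1.length : Int) ++ " files changed)"] else fa0
  let fa2 := if r.2.1 ≠ [] then fa1 ++ ["API Endpoints (" ++ PySem.Int.toStr (r.2.1.length : Int) ++ " files changed)"] else fa1
  let fa3 := if r.2.2.1 ≠ [] then fa2 ++ ["Database Schema (" ++ PySem.Int.toStr (r.2.2.1.length : Int) ++ " files changed)"] else fa2
  let fa4 := if r.2.2.2.1 ≠ [] then fa3 ++ ["Configuration (" ++ PySem.Int.toStr (r.2.2.2.1.length : Int) ++ " files changed)"] else fa3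
  if fa4 ≠ [] then fa4 else ["General functionality"]

-- ===== PORT B =====
def pvRules : List (String × List String) :=
  [("UI Components", [".tsx", ".jsx", ".vue", ".svelte", "components/"]),
   ("API Endpoints", ["api/", "routes/", "endpoints/", "views.py", "controllers/"]),
   ("Database Schema", ["models/", "schema", "migrations/", "db/"]),
   ("Configuration", [".config", ".json", ".yml", ".yaml", ".env"])]

def get_test_focus_areas_alt (pr_files : List (List (String × String))) (codebase_analysis : List (String × String)) : List String :=
  let fa := pvRules.foldl
    (fun (acc : List String) rule =>
      let c := pr_files.countP (fun f => rule.2.any (fun p => PySem.Str.isIn p (pvFname f)))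
      if c ≠ 0 then acc ++ [rule.1 ++ " (" ++ PySem.Int.toStr (c : Int) ++ " files changed)"] else acc)
    []
  if fa.isEmpty then ["General functionality"] else fa

-- ===== PRECONDITION & SPEC =====
-- Pre_ excludes only files without a "filename" key, on which the Python A raises KeyError.
def Pre_get_test_focus_areas (pr_files : List (List (String × String))) (codebase_analysis : List (String × String)) : Prop :=
  ∀ fi ∈ pr_files, (fi.find? (fun kv => kv.1 == "filename")).isSome = true
instance (pr_files : List (List (String × String))) (codebase_analysis : List (String × String)) : Decidable (Pre_get_test_focus_areas pr_files codebase_analysis) := by unfold Pre_get_test_focus_areas; infer_instance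

def pvWitness_get_test_focus_areas : (List (List (String × String))) × (List (String × String)) :=
  ([[("filename", "src/components/App.tsx")], [("filename", "api/users.py")]], [("language", "python")])

def Spec_get_test_focus_areas (pr_files : List (List (String × String))) (codebase_analysis : List (String × String)) (out : List String) : Prop := out = get_test_focus_areas_alt pr_files codebase_analysis
instance (pr_files : List (List (String × String))) (codebase_analysis : List (String × String)) (out : List String) : Decidable (Spec_get_test_focus_areas pr_files codebase_analysis out) := by unfold Spec_get_test_focus_areas; infer_instance

-- ===== CLAIM (what is proved, stated in full; the proofs are below) =====
def Claim_equal_get_test_focus_areas : Prop := ∀ (pr_files : List (List (String × String))) (codebase_analysis : List (String × String)), Dom_get_test_focus_areas pr_files codebase_analysis → Pre_get_test_focus_areas pr_files codebase_analysis → Spec_get_test_focus_areas pr_files codebase_analysis (get_test_focus_areas pr_files codebase_analysis)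

-- ===== LEMMAS AND PROOFS =====

-- the per-file predicate of category `pats`
def pvMatch (pats : List String) (fi : List (String × String)) : Bool :=
  pats.any (fun p => PySem.Str.isIn p (pvFname fi))

-- A's categorizing foldl computes, per component, the mapped filter of the whole list
theorem pvFoldA (l : List (List (String × String)))
    (st : List String × List String × List String × List String × List String) :
    l.foldl
      (fun (st : List String × List String × List String × List String × List String) fi =>
        let filename := pvFname fi
        let ui := if [".tsx", ".jsx", ".vue", ".svelte", "components/"].any (fun ext => PySem.Str.isIn ext filename) then st.1 ++ [filename] else st.1
        let api := if ["api/", "routes/", "endpoints/", "views.py", "controllers/"].any (fun p => PySem.Str.isIn p filename) then st.2.1 ++ [filename] else st.2.1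
        let db := if ["models/", "schema", "migrations/", "db/"].any (fun p => PySem.Str.isIn p filename) then st.2.2.1 ++ [filename] else st.2.2.1
        let cfg := if [".config", ".json", ".yml", ".yaml", ".env"].any (fun ext => PySem.Str.isIn ext filename) then st.2.2.2.1 ++ [filename] else st.2.2.2.1
        let ts := if ["test", "spec", "__tests__"].any (fun p => PySem.Str.isIn p filename) then st.2.2.2.2 ++ [filename] else st.2.2.2.2
        (ui, api, db, cfg, ts)) st
    = (st.1 ++ (l.filter (pvMatch [".tsx", ".jsx", ".vue", ".svelte", "components/"])).map pvFname,
       st.2.1 ++ (l.filter (pvMatch ["api/", "routes/", "endpoints/", "views.py", "controllers/"])).map pvFname,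
       st.2.2.1 ++ (l.filter (pvMatch ["models/", "schema", "migrations/", "db/"])).map pvFname,
       st.2.2.2.1 ++ (l.filter (pvMatch [".config", ".json", ".yml", ".yaml", ".env"])).map pvFname,
       st.2.2.2.2 ++ (l.filter (pvMatch ["test", "spec", "__tests__"])).map pvFname) := by
  induction l generalizing st with
  | nil => simp
  | cons fi t ih =>
    simp only [List.foldl_cons]
    rw [ih]
    simp only [List.filter_cons, pvMatch]
    split_ifs <;> simp

theorem pvLenFilter (pats : List String) (l : List (List (String × String))) :
    ((l.filter (pvMatch pats)).map pvFname).length = l.countP (fun f => pats.any (fun p => PySem.Str.isIn p (pvFname f))) := by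
  rw [List.length_map, List.countP_eq_length_filter]
  rfl

theorem pvNeNil (pats : List String) (l : List (List (String × String))) :
    ((l.filter (pvMatch pats)).map pvFname ≠ []) ↔ (l.countP (fun f => pats.any (fun p => PySem.Str.isIn p (pvFname f))) ≠ 0) := by
  rw [← pvLenFilter]
  exact not_congr List.length_eq_zero_iff.symm

theorem pvLast (l : List String) :
    (if l ≠ [] then l else ["General functionality"]) = (if l.isEmpty then ["General functionality"] else l) := by
  cases l <;> simp

-- ===== VERDICT (by name: the statement is the Claim_ definition above) =====
theorem get_test_focus_areas_spec : Claim_equal_get_test_focus_areas := by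
  intro pr_files codebase_analysis _ _
  unfold Spec_get_test_focus_areas get_test_focus_areas get_test_focus_areas_alt pvRules
  rw [pvFoldA]
  have h1 : ("UI Components" ++ " (" : String) = "UI Components (" := rfl
  have h2 : ("API Endpoints" ++ " (" : String) = "API Endpoints (" := rfl
  have h3 : ("Database Schema" ++ " (" : String) = "Database Schema (" := rfl
  have h4 : ("Configuration" ++ " (" : String) = "Configuration (" := rfl
  simp only [List.foldl_cons, List.foldl_nil, List.nil_append, pvNeNil, pvLenFilter, h1, h2, h3, h4]
  exact pvLast _
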